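-- pv_equiv track=rewrite | github.com/JohnJayMcKaye/DWSK-feedgenerator | feed_manager.py | _trim_to_first_heading
-- ===== SOURCE A (Python) =====
-- def _trim_to_first_heading(text):
--     """Schneidet alles vor der ersten # Ueberschrift ab.
--     So wird Hugo-Frontmatter-Restmuell am Anfang des Bodys entfernt."""
--     if not text:
--         return text
--     lines = text.split('\n')
--     for i, line in enumerate(lines):
--         if line.strip().startswith('#'):
--             return '\n'.join(lines[i:])
--     # Keine Ueberschrift gefunden – ab erster nicht-leerer Zeile
--     for i, line in enumerate(lines):
--         if line.strip():
--             return '\n'.join(lines[i:])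
--     return text
-- ===== SOURCE B (Python) =====
-- def _trim_to_first_heading(text):
--     """Single pass over the raw string: track line-start offsets and slice the
--     original text instead of splitting into a list and rejoining."""
--     if not text:
--         return text
--     pos = 0
--     first_nonempty = None
--     while True:
--         nl = text.find('\n', pos)
--         line = text[pos:] if nl == -1 else text[pos:nl]
--         if line.strip().startswith('#'):
--             return text[pos:]
--         if first_nonempty is None and line.strip():
--             first_nonempty = pos
--         if nl == -1:
--             break
--         pos = nl + 1
--     return text if first_nonempty is None else text[first_nonempty:]
-- ===== Notes on version B (the rewrite author's own statement) =====
-- stated objective: alternative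
-- what changed: B scans the raw string once, tracking the offset of each line start and of the first non-blank line, and returns a single suffix slice of the original text instead of splitting into a line list, looping over it twice and rejoining.
import Mathlib
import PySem

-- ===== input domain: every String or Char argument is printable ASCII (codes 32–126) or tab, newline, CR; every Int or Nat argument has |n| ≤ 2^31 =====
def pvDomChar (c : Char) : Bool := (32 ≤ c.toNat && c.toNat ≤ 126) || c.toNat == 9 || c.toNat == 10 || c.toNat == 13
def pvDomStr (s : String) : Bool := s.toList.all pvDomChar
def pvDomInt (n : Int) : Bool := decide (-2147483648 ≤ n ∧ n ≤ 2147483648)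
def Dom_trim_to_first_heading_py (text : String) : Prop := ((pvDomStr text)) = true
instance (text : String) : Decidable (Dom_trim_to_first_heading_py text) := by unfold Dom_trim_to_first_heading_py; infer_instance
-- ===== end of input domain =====

-- B rewrites A's split/loop/rejoin as one scan over the raw string that returns a suffix slice; same values, same cost (objective: alternative).

-- ===== PORT A =====
-- first loop of A: return lines[i:] at the first line whose strip() starts with '#'
def aLoop1 : List (List Char) → Option (List (List Char))
  | [] => none
  | l :: rest =>
    if PySem.Chars.startswith (PySem.Chars.strip l) ['#'] then some (l :: rest)
    else aLoop1 rest

-- second loop of A: return lines[i:] at the first line whose strip() is truthy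
def aLoop2 : List (List Char) → Option (List (List Char))
  | [] => none
  | l :: rest =>
    if !(PySem.Chars.strip l).isEmpty then some (l :: rest)
    else aLoop2 rest

def trim_to_first_heading_py (text : String) : String :=
  if text = "" then text
  else
    let lines := PySem.Chars.splitOn text.toList ['\n']
    match aLoop1 lines with
    | some suf => String.ofList (PySem.Chars.join ['\n'] suf)
    | none =>
      match aLoop2 lines with
      | some suf => String.ofList (PySem.Chars.join ['\n'] suf)
      | none => text

-- ===== PORT B =====
-- text.find('\n', pos) + slicing, expressed on the suffix starting at pos:
-- splitNL cs = (current line, rest after the first '\n' if any)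
def splitNL : List Char → List Char × Option (List Char)
  | [] => ([], none)
  | c :: cs =>
    if c = '\n' then ([], some cs)
    else
      let p := splitNL cs
      (c :: p.1, p.2)

theorem splitNL_rest_length : ∀ (cs r : List Char), (splitNL cs).2 = some r → r.length < cs.length := by
  intro cs
  induction cs with
  | nil => intro r h; simp [splitNL] at h
  | cons c cs ih =>
    intro r h
    by_cases hc : c = '\n'
    · simp [splitNL, hc] at h; subst h; simp
    · simp [splitNL, hc] at h
      exact Nat.lt_succ_of_lt (ih r h)

-- B's while loop: cs is text[pos:], fne is text[first_nonempty:] if set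
def bScan (cs : List Char) (fne : Option (List Char)) : Option (List Char) :=
  let line := (splitNL cs).1
  if PySem.Chars.startswith (PySem.Chars.strip line) ['#'] then some cs
  else
    let fne' := if fne.isNone && !(PySem.Chars.strip line).isEmpty then some cs else fne
    match h : (splitNL cs).2 with
    | some rest => bScan rest fne'
    | none => fne'
termination_by cs.length
decreasing_by exact splitNL_rest_length cs rest h

def trim_to_first_heading_py_alt (text : String) : String :=
  if text = "" then text
  else
    match bScan text.toList none with
    | some suf => String.ofList suf
    | none => text

-- ===== PRECONDITION & SPEC =====
def Spec_trim_to_first_heading_py (text : String) (out : String) : Prop := out = trim_to_first_heading_py_alt text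
instance (text : String) (out : String) : Decidable (Spec_trim_to_first_heading_py text out) := by unfold Spec_trim_to_first_heading_py; infer_instance

-- ===== CLAIM (what is proved, stated in full; the proofs are below) =====
def Claim_equal_trim_to_first_heading_py : Prop := ∀ (text : String), Dom_trim_to_first_heading_py text → Spec_trim_to_first_heading_py text (trim_to_first_heading_py text)

-- ===== LEMMAS AND PROOFS =====

-- proof-side spec of str.split('\n')
def splitNLlist : List Char → List (List Char)
  | [] => [[]]
  | c :: cs =>
    if c = '\n' then [] :: splitNLlist cs
    else
      match splitNLlist cs with
      | [] => [[c]]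
      | l :: ls => (c :: l) :: ls

theorem splitNLlist_ne_nil (cs : List Char) : splitNLlist cs ≠ [] := by
  induction cs with
  | nil => simp [splitNLlist]
  | cons c cs ih =>
    by_cases hc : c = '\n'
    · simp [splitNLlist, hc]
    · simp only [splitNLlist, hc, if_false]
      cases h : splitNLlist cs with
      | nil => simp
      | cons l ls => simp

-- splitNL is one step of splitNLlist, and reconstructs cs
theorem splitNLlist_step (cs : List Char) :
    splitNLlist cs = (splitNL cs).1 ::
      (match (splitNL cs).2 with | none => [] | some r => splitNLlist r) := by
  induction cs with
  | nil => simp [splitNLlist, splitNL]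
  | cons c cs ih =>
    by_cases hc : c = '\n'
    · simp [splitNLlist, splitNL, hc]
    · simp only [splitNLlist, splitNL, hc, if_false]
      rw [ih]

theorem splitNL_recon (cs : List Char) :
    cs = (splitNL cs).1 ++ (match (splitNL cs).2 with | none => [] | some r => '\n' :: r) := by
  induction cs with
  | nil => simp [splitNL]
  | cons c cs ih =>
    by_cases hc : c = '\n'
    · simp [splitNL, hc]
    · simp only [splitNL, hc, if_false]
      exact congrArg (c :: ·) ih

def consFirst (p : List Char) : List (List Char) → List (List Char)
  | [] => [p]
  | x :: xs => (p ++ x) :: xs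

theorem go_spec : ∀ (fuel : Nat) (l cur : List Char) (acc : List (List Char)),
    l.length < fuel →
    PySem.Chars.splitOn.go ['\n'] fuel l cur acc =
      acc.reverse ++ consFirst cur.reverse (splitNLlist l) := by
  intro fuel
  induction fuel with
  | zero => intro l cur acc h; omega
  | succ f ih =>
    intro l cur acc h
    cases l with
    | nil =>
      rw [PySem.Chars.splitOn.go.eq_def]
      simp [splitNLlist, consFirst]
    | cons c rest =>
      rw [PySem.Chars.splitOn.go.eq_def]
      simp only [List.isPrefixOf, Bool.and_true]
      by_cases hc : c = '\n'
      · rw [if_pos (by simp [hc])]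
        simp only [List.length_cons, List.length_nil, List.drop_succ_cons, List.drop_zero]
        rw [ih rest [] (cur.reverse :: acc) (by simpa using h)]
        have hne := splitNLlist_ne_nil rest
        cases hs : splitNLlist rest with
        | nil => exact absurd hs hne
        | cons x xs =>
          simp [splitNLlist, hc, hs, consFirst]
      · rw [if_neg (by simp; exact fun h => hc h.symm)]
        rw [ih rest (c :: cur) acc (by simpa using h)]
        have hne := splitNLlist_ne_nil rest
        cases hs : splitNLlist rest with
        | nil => exact absurd hs hne
        | cons x xs =>
          simp [splitNLlist, hc, hs, consFirst]

theorem splitOn_eq (cs : List Char) :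
    PySem.Chars.splitOn cs ['\n'] = splitNLlist cs := by
  unfold PySem.Chars.splitOn
  rw [go_spec (cs.length + 1) cs [] [] (by omega)]
  have hne := splitNLlist_ne_nil cs
  cases hs : splitNLlist cs with
  | nil => exact absurd hs hne
  | cons x xs => simp [consFirst]

theorem join_cons_head (sep l : List Char) (c : Char) (ls : List (List Char)) :
    PySem.Chars.join sep ((c :: l) :: ls) = c :: PySem.Chars.join sep (l :: ls) := by
  cases ls with
  | nil => simp [PySem.Chars.join_singleton]
  | cons q rest => simp [PySem.Chars.join_cons_cons]

theorem join_splitNLlist (cs : List Char) :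
    PySem.Chars.join ['\n'] (splitNLlist cs) = cs := by
  induction cs with
  | nil => simp [splitNLlist, PySem.Chars.join_singleton]
  | cons c cs ih =>
    have hne := splitNLlist_ne_nil cs
    by_cases hc : c = '\n'
    · cases hs : splitNLlist cs with
      | nil => exact absurd hs hne
      | cons x xs =>
        simp only [splitNLlist, hc, if_true]
        rw [hs, PySem.Chars.join_cons_cons]
        rw [hs] at ih
        simp [ih]
    · cases hs : splitNLlist cs with
      | nil => exact absurd hs hne
      | cons x xs =>
        simp only [splitNLlist, hc, if_false, hs]
        rw [join_cons_head, ← hs, ih]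

def bRHS (cs : List Char) (fne : Option (List Char)) : Option (List Char) :=
  match aLoop1 (splitNLlist cs) with
  | some suf => some (PySem.Chars.join ['\n'] suf)
  | none =>
    match fne with
    | some s => some s
    | none => (aLoop2 (splitNLlist cs)).map (PySem.Chars.join ['\n'])

theorem join_cons_splitNLlist (line rest : List Char) :
    PySem.Chars.join ['\n'] (line :: splitNLlist rest) = line ++ '\n' :: rest := by
  have hne := splitNLlist_ne_nil rest
  cases hs : splitNLlist rest with
  | nil => exact absurd hs hne
  | cons x xs =>
    rw [PySem.Chars.join_cons_cons, ← hs, join_splitNLlist rest]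
    simp

theorem bScan_spec_aux : ∀ (n : Nat) (cs : List Char), cs.length < n →
    ∀ (fne : Option (List Char)), bScan cs fne = bRHS cs fne := by
  intro n
  induction n with
  | zero => intro cs h; omega
  | succ m ih =>
    intro cs hlen fne
    have hstep := splitNLlist_step cs
    by_cases hh : PySem.Chars.startswith (PySem.Chars.strip (splitNL cs).1) ['#'] = true
    · have hA : aLoop1 (splitNLlist cs) = some (splitNLlist cs) := by
        rw [hstep]; simp [aLoop1, hh]
      rw [bScan]
      simp only [hh, if_true]
      rw [bRHS.eq_def, hA]
      show some cs = some (PySem.Chars.join ['\n'] (splitNLlist cs))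
      rw [join_splitNLlist]
    · have hhf : PySem.Chars.startswith (PySem.Chars.strip (splitNL cs).1) ['#'] = false :=
        Bool.eq_false_iff.mpr hh
      rw [bScan]
      simp only [hhf, Bool.false_eq_true, if_false]
      split
      next rest hr =>
        have hrec := splitNL_recon cs
        rw [hr] at hrec
        have hrec' : cs = (splitNL cs).1 ++ '\n' :: rest := hrec
        rw [hr] at hstep
        have hstep' : splitNLlist cs = (splitNL cs).1 :: splitNLlist rest := hstep
        have hrlen : rest.length < m := by
          have := splitNL_rest_length cs rest hr
          omega
        have hA1 : aLoop1 (splitNLlist cs) = aLoop1 (splitNLlist rest) := by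
          rw [hstep']; simp [aLoop1, hhf]
        rw [ih rest hrlen]
        rw [bRHS.eq_def, bRHS.eq_def, hA1]
        cases h1 : aLoop1 (splitNLlist rest) with
        | some suf => simp
        | none =>
          simp only
          cases fne with
          | some s => simp
          | none =>
            simp only [Option.isNone_none, Bool.true_and]
            by_cases hne : (PySem.Chars.strip (splitNL cs).1).isEmpty
            · have hA2 : aLoop2 (splitNLlist cs) = aLoop2 (splitNLlist rest) := by
                rw [hstep']; simp [aLoop2, hne]
              simp [hne, hA2]
            · have hA2 : aLoop2 (splitNLlist cs) = some (splitNLlist cs) := by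
                rw [hstep']; simp [aLoop2, hne]
              simp only [hne, Bool.not_false, if_true, hA2, Option.map_some]
              rw [hstep', join_cons_splitNLlist, ← hrec']
      next hr =>
        have hcs : cs = (splitNL cs).1 := by
          have hrec := splitNL_recon cs
          rw [hr] at hrec; simpa using hrec
        rw [hr] at hstep
        have hstep' : splitNLlist cs = [(splitNL cs).1] := hstep
        have hA : aLoop1 (splitNLlist cs) = none := by
          rw [hstep']; simp [aLoop1, hhf]
        rw [bRHS.eq_def, hA]
        cases fne with
        | some s => simp
        | none =>
          simp only [Option.isNone_none, Bool.true_and]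
          by_cases hne : (PySem.Chars.strip (splitNL cs).1).isEmpty
          · simp [hne, aLoop2, hstep']
          · have hA2 : aLoop2 (splitNLlist cs) = some [(splitNL cs).1] := by
              rw [hstep']; simp [aLoop2, hne]
            simp only [hne, Bool.not_false, if_true, hA2, Option.map_some,
              PySem.Chars.join_singleton]
            rw [← hcs]

theorem bScan_spec (cs : List Char) (fne : Option (List Char)) :
    bScan cs fne =
      match aLoop1 (splitNLlist cs) with
      | some suf => some (PySem.Chars.join ['\n'] suf)
      | none =>
        match fne with
        | some s => some s
        | none => (aLoop2 (splitNLlist cs)).map (PySem.Chars.join ['\n']) :=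
  bScan_spec_aux (cs.length + 1) cs (by omega) fne

-- ===== VERDICT (by name: the statement is the Claim_ definition above) =====
theorem trim_to_first_heading_py_spec : Claim_equal_trim_to_first_heading_py := by
  intro text _
  unfold Spec_trim_to_first_heading_py trim_to_first_heading_py trim_to_first_heading_py_alt
  by_cases ht : text = ""
  · simp [ht]
  · simp only [ht, if_false]
    rw [splitOn_eq, bScan_spec]
    cases aLoop1 (splitNLlist text.toList) with
    | some suf => simp
    | none =>
      simp only
      cases h2 : aLoop2 (splitNLlist text.toList) with
      | some suf => simp
      | none => simp
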